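-- pv_equiv track=rewrite | github.com/pelahumi/EvaluacionTema3 | Ejercicios/Ejercicio3/ejercicio3.py | halcon_estrella
-- ===== SOURCE A (Python) =====
-- def halcon_estrella(lista):
--     #Hacemos un bucle que recorra la lista de diccionarios y si hay alguna nave con el nombre Halcon milenario o Estrella de la muerte nos devuelve una lista con los datos de la nave
--     naves = []
--     for i in lista:
--         if i["Nombre"] == "Halcon milenario":
--             naves.append(i)
--
--     for i in lista:
--         if i["Nombre"] == "Estrella de la muerte":
--             naves.append(i)
--
--     return naves
-- ===== SOURCE B (Python) =====
-- def halcon_estrella(lista):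
--     # Single pass partitioning into two buckets, then concatenate.
--     halcones = []
--     estrellas = []
--     for i in lista:
--         nombre = i["Nombre"]
--         if nombre == "Halcon milenario":
--             halcones.append(i)
--         elif nombre == "Estrella de la muerte":
--             estrellas.append(i)
--     return halcones + estrellas
-- ===== Notes on version B (the rewrite author's own statement) =====
-- stated objective: simpler
-- what changed: Replaces A's two full scans of the list with a single pass that partitions ships into a 'halcones' and an 'estrellas' bucket and returns their concatenation.
import Mathlib
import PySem

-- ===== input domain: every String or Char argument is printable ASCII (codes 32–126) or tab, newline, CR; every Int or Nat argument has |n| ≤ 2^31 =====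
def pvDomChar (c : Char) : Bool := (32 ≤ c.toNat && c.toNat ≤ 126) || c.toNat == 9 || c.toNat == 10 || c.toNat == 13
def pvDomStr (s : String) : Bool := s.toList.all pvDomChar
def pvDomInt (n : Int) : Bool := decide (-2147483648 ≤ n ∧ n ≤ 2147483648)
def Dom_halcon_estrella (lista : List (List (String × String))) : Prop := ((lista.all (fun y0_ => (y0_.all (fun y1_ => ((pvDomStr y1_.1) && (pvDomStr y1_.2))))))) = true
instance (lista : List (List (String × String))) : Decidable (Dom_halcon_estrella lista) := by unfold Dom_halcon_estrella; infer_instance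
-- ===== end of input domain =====

-- B changes the decomposition: one pass with two buckets instead of A's two full scans (return value only).

-- ===== PORT A =====
-- two sequential scans, each appending matches to `naves`
def halcon_estrella (lista : List (List (String × String))) : List (List (String × String)) :=
  let naves := lista.foldl (fun naves i =>
    if (PySem.Dict.mk i).get? "Nombre" == some "Halcon milenario" then naves ++ [i] else naves) []
  lista.foldl (fun naves i =>
    if (PySem.Dict.mk i).get? "Nombre" == some "Estrella de la muerte" then naves ++ [i] else naves) naves

-- ===== PORT B =====
-- one pass maintaining the pair (halcones, estrellas), then concatenation
def halcon_estrella_alt (lista : List (List (String × String))) : List (List (String × String)) :=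
  let p := lista.foldl (fun (p : List (List (String × String)) × List (List (String × String))) i =>
    let nombre := (PySem.Dict.mk i).get? "Nombre"
    if nombre == some "Halcon milenario" then (p.1 ++ [i], p.2)
    else if nombre == some "Estrella de la muerte" then (p.1, p.2 ++ [i])
    else p) ([], [])
  p.1 ++ p.2

-- ===== PRECONDITION & SPEC =====
-- Pre_ excludes ships without a "Nombre" key, on which Python A raises KeyError.
def Pre_halcon_estrella (lista : List (List (String × String))) : Prop :=
  ∀ i ∈ lista, ((PySem.Dict.mk i).get? "Nombre").isSome
instance (lista : List (List (String × String))) : Decidable (Pre_halcon_estrella lista) := by unfold Pre_halcon_estrella; infer_instance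
def pvWitness_halcon_estrella : (List (List (String × String))) :=
  [[("Nombre", "Halcon milenario"), ("Tripulacion", "4")], [("Nombre", "X-Wing")], [("Nombre", "Estrella de la muerte")]]
def Spec_halcon_estrella (lista : List (List (String × String))) (out : List (List (String × String))) : Prop := out = halcon_estrella_alt lista
instance (lista : List (List (String × String))) (out : List (List (String × String))) : Decidable (Spec_halcon_estrella lista out) := by unfold Spec_halcon_estrella; infer_instance

-- ===== CLAIM (what is proved, stated in full; the proofs are below) =====
def Claim_equal_halcon_estrella : Prop := ∀ (lista : List (List (String × String))), Dom_halcon_estrella lista → Pre_halcon_estrella lista → Spec_halcon_estrella lista (halcon_estrella lista)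

-- ===== LEMMAS AND PROOFS =====

def predH (i : List (String × String)) : Bool := (PySem.Dict.mk i).get? "Nombre" == some "Halcon milenario"
def predE (i : List (String × String)) : Bool := (PySem.Dict.mk i).get? "Nombre" == some "Estrella de la muerte"

theorem foldl_filter_acc {α : Type} (p : α → Bool) (l : List α) (acc : List α) :
    l.foldl (fun naves i => if p i then naves ++ [i] else naves) acc = acc ++ l.filter p := by
  induction l generalizing acc with
  | nil => simp
  | cons x xs ih =>
    simp only [List.foldl_cons, List.filter_cons]
    by_cases h : p x <;> simp [h, ih]

theorem pair_fold_filter {α : Type} (pH pE : α → Bool) (hdisj : ∀ a, pH a → pE a = false)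
    (l : List α) (h e : List α) :
    l.foldl (fun p i => if pH i then (p.1 ++ [i], p.2) else if pE i then (p.1, p.2 ++ [i]) else p) (h, e)
      = (h ++ l.filter pH, e ++ l.filter pE) := by
  induction l generalizing h e with
  | nil => simp
  | cons x xs ih =>
    simp only [List.foldl_cons, List.filter_cons]
    by_cases hH : pH x
    · simp [hH, hdisj x hH, ih]
    · by_cases hE : pE x <;> simp [hH, hE, ih]

theorem halcon_estrella_eq_filters (lista : List (List (String × String))) :
    halcon_estrella lista = lista.filter predH ++ lista.filter predE := by
  have h2 := foldl_filter_acc predE lista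
      (lista.foldl (fun naves i => if predH i then naves ++ [i] else naves) [])
  exact h2.trans (by rw [foldl_filter_acc predH lista []]; simp)

theorem predH_predE_disj : ∀ a, predH a → predE a = false := by
  intro a ha
  simp only [predH, beq_iff_eq] at ha
  simp [predE, ha]

theorem halcon_estrella_alt_eq_filters (lista : List (List (String × String))) :
    halcon_estrella_alt lista = lista.filter predH ++ lista.filter predE := by
  have h2 := congrArg
      (fun p : List (List (String × String)) × List (List (String × String)) => p.1 ++ p.2)
      (pair_fold_filter predH predE predH_predE_disj lista [] [])
  simp only [List.nil_append] at h2
  exact h2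

-- ===== VERDICT (by name: the statement is the Claim_ definition above) =====
theorem halcon_estrella_spec : Claim_equal_halcon_estrella := by
  intro lista _ _
  unfold Spec_halcon_estrella
  rw [halcon_estrella_eq_filters, halcon_estrella_alt_eq_filters]
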